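-- pv_equiv track=rewrite | github.com/wazuh/wazuh | tools/policy-migration/refactor_regex.py | _has_unescaped_brackets
-- ===== SOURCE A (Python) =====
-- from typing import List, Tuple, Set, Optional
--
-- def _has_unescaped_brackets(payload: str, quote_char: Optional[str]) -> bool:
--     """Return True if payload contains an unescaped '[' or ']' based on quote style.
--     - Double-quoted: needs escaping unless at least two consecutive backslashes (even count >= 2)
--     - Single/unquoted: needs escaping if preceding backslashes count is even
--     """
--     n = len(payload)
--     i = 0
--     while i < n:
--         ch = payload[i]
--         if ch in ('[', ']'):
--             # Count preceding backslashes
--             cnt = 0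
--             k = i - 1
--             while k >= 0 and payload[k] == '\\':
--                 cnt += 1
--                 k -= 1
--             if quote_char == '"':
--                 if not (cnt >= 2 and (cnt % 2 == 0)):
--                     return True
--             else:
--                 if cnt % 2 == 0:
--                     return True
--         i += 1
--     return False
-- ===== SOURCE B (Python) =====
-- from typing import Optional
--
-- def _has_unescaped_brackets(payload: str, quote_char: Optional[str]) -> bool:
--     run = 0  # length of the current run of consecutive backslashes
--     for ch in payload:
--         if ch in ('[', ']'):
--             if quote_char == '"':
--                 if not (run >= 2 and run % 2 == 0):
--                     return True
--             else:
--                 if run % 2 == 0: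
--                     return True
--             run = 0
--         elif ch == '\\':
--             run += 1
--         else:
--             run = 0
--     return False
-- ===== Notes on version B (the rewrite author's own statement) =====
-- stated objective: faster
-- what changed: Single forward pass maintaining the running count of consecutive backslashes, instead of rescanning backwards from every bracket to count preceding backslashes.
import Mathlib
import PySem

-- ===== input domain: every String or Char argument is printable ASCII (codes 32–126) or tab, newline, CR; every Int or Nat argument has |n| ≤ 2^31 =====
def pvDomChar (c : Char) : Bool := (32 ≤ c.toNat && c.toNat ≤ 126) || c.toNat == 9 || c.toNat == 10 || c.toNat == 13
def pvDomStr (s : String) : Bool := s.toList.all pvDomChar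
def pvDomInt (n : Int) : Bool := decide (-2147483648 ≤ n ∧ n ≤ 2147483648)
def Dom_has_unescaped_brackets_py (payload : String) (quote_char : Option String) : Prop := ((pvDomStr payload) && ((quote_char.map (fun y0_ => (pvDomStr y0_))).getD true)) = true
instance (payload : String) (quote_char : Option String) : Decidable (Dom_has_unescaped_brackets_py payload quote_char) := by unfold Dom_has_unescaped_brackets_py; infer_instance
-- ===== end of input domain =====

-- B is a single forward pass keeping a running consecutive-backslash count; A rescans
-- backwards from every bracket. Objective: faster (O(n) vs O(n^2)).

-- ===== PORT A =====
-- inner while loop of A: count of backslashes at positions j-1, j-2, … (j = k+1, stops at j = 0)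
def pvCountPrec (pl : List Char) : Nat → Nat
  | 0 => 0
  | j + 1 => if pl.getD j ' ' = '\\' then pvCountPrec pl j + 1 else 0

-- outer while loop of A, index i running up to pl.length
def pvLoopA (pl : List Char) (quote_char : Option String) (i : Nat) : Bool :=
  if h : i < pl.length then
    let ch := pl.getD i ' '
    if ch = '[' ∨ ch = ']' then
      let cnt := pvCountPrec pl i
      if quote_char = some "\"" then
        if ¬ (cnt ≥ 2 ∧ cnt % 2 = 0) then true else pvLoopA pl quote_char (i + 1)
      else
        if cnt % 2 = 0 then true else pvLoopA pl quote_char (i + 1)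
    else pvLoopA pl quote_char (i + 1)
  else false
termination_by pl.length - i

def has_unescaped_brackets_py (payload : String) (quote_char : Option String) : Bool :=
  pvLoopA payload.toList quote_char 0

-- ===== PORT B =====
-- single pass, `run` = length of the current run of consecutive backslashes
def pvLoopB (quote_char : Option String) : List Char → Nat → Bool
  | [], _ => false
  | ch :: rest, run =>
    if ch = '[' ∨ ch = ']' then
      if quote_char = some "\"" then
        if ¬ (run ≥ 2 ∧ run % 2 = 0) then true else pvLoopB quote_char rest 0
      else
        if run % 2 = 0 then true else pvLoopB quote_char rest 0
    else if ch = '\\' then pvLoopB quote_char rest (run + 1)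
    else pvLoopB quote_char rest 0

def has_unescaped_brackets_py_alt (payload : String) (quote_char : Option String) : Bool :=
  pvLoopB quote_char payload.toList 0

-- ===== PRECONDITION & SPEC =====
def Spec_has_unescaped_brackets_py (payload : String) (quote_char : Option String) (out : Bool) : Prop := out = has_unescaped_brackets_py_alt payload quote_char
instance (payload : String) (quote_char : Option String) (out : Bool) : Decidable (Spec_has_unescaped_brackets_py payload quote_char out) := by unfold Spec_has_unescaped_brackets_py; infer_instance

-- ===== CLAIM (what is proved, stated in full; the proofs are below) =====
def Claim_equal_has_unescaped_brackets_py : Prop := ∀ (payload : String) (quote_char : Option String), Dom_has_unescaped_brackets_py payload quote_char → Spec_has_unescaped_brackets_py payload quote_char (has_unescaped_brackets_py payload quote_char)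

-- ===== LEMMAS AND PROOFS =====

-- invariant: at position i, A's backward count equals B's running count
theorem pvLoop_agree (pl : List Char) (qc : Option String) :
    ∀ i, i ≤ pl.length → pvLoopA pl qc i = pvLoopB qc (pl.drop i) (pvCountPrec pl i) := by
  intro i hi
  induction h : pl.length - i generalizing i with
  | zero =>
      have : i = pl.length := by omega
      subst this
      rw [pvLoopA]
      simp [pvLoopB]
  | succ n ih =>
      have hlt : i < pl.length := by omega
      rw [pvLoopA]
      have hdrop : pl.drop i = pl.getD i ' ' :: pl.drop (i + 1) := by
        rw [List.getD_eq_getElem pl ' ' hlt]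
        exact (List.drop_eq_getElem_cons hlt)
      rw [hdrop, pvLoopB]
      have hrec : ∀ r, pvCountPrec pl (i+1) = r →
          pvLoopA pl qc (i+1) = pvLoopB qc (pl.drop (i+1)) r := by
        intro r hr; rw [← hr]; exact ih (i+1) (by omega) (by omega)
      have hstep : pvCountPrec pl (i+1)
          = if pl.getD i ' ' = '\\' then pvCountPrec pl i + 1 else 0 := rfl
      by_cases hb : pl.getD i ' ' = '[' ∨ pl.getD i ' ' = ']'
      · have hnb : pl.getD i ' ' ≠ '\\' := by
          rcases hb with h | h <;> rw [h] <;> decide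
        have hnext : pvCountPrec pl (i+1) = 0 := by rw [hstep, if_neg hnb]
        simp only [dif_pos hlt, if_pos hb]
        split_ifs <;> first | rfl | (exact hrec 0 hnext)
      · simp only [dif_pos hlt, if_neg hb]
        by_cases hbs : pl.getD i ' ' = '\\'
        · simp only [if_pos hbs]
          exact hrec _ (by rw [hstep, if_pos hbs])
        · simp only [if_neg hbs]
          exact hrec 0 (by rw [hstep, if_neg hbs])

-- ===== VERDICT (by name: the statement is the Claim_ definition above) =====
theorem has_unescaped_brackets_py_spec : Claim_equal_has_unescaped_brackets_py := by
  intro payload quote_char _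
  unfold Spec_has_unescaped_brackets_py has_unescaped_brackets_py has_unescaped_brackets_py_alt
  have h := pvLoop_agree payload.toList quote_char 0 (Nat.zero_le _)
  simpa [pvCountPrec] using h
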